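-- pv_equiv track=rewrite | github.com/jfisteus/eyegrade | eyegrade/utils.py | decode_model
-- ===== SOURCE A (Python) =====
-- def decode_model(bit_list, accept_model_0=False):
--     """Given the bits that encode the model, returns the associated letter.
--
--        It decoding/checksum fails, None is returned. The list of bits must
--        be a list of boolean variables.
--
--        The special model 0 is not valid unless `accept_model_0` is set.
--
--     """
--     # x3 = x0 ^ x1 ^ not x2; x0-x3 == x4-x7 == x8-x11 == ...
--     valid = False
--     if len(bit_list) == 3:
--         valid = True
--     elif len(bit_list) >= 4:
--         if (bit_list[3] == bit_list[0] ^ bit_list[1] ^ (not bit_list[2])):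
--             valid = True
--             for i in range(4, len(bit_list)):
--                 if bit_list[i] != bit_list[i - 4]:
--                     valid = False
--                     break
--     if valid:
--         return chr(65 + (int(bit_list[0]) | int(bit_list[1]) << 1 |
--                   int(bit_list[2]) << 2))
--     elif accept_model_0 and max(bit_list) == False:
--         return '0'
--     else:
--         return None
-- ===== SOURCE B (Python) =====
-- def decode_model(bit_list, accept_model_0=False):
--     """Decode by reconstruction: rebuild the expected codeword (the 4-bit
--     block [b0, b1, b2, checksum] repeated) from the first three bits and
--     compare it with the input."""
--     n = len(bit_list)
--     if n >= 3:
--         b0, b1, b2 = bit_list[0], bit_list[1], bit_list[2]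
--         block = [b0, b1, b2, b0 ^ b1 ^ (not b2)]
--         expected = (block * ((n + 3) // 4))[:n]
--         if bit_list == expected:
--             return chr(65 + int(b0) + 2 * int(b1) + 4 * int(b2))
--     if accept_model_0 and not any(bit_list):
--         return '0'
--     return None
-- ===== Notes on version B (the rewrite author's own statement) =====
-- stated objective: alternative
-- what changed: A checks per-index constraints (a parity test on bit 3 plus an index loop bit_list[i]!=bit_list[i-4] with a valid flag); B instead RECONSTRUCTS the full expected codeword from the first three bits (the 4-bit block [b0,b1,b2,checksum] repeated and truncated to the input length) and accepts iff the input equals that generated codeword.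
-- outside the precondition, e.g. on decode_model([], True): A raises ValueError, B returns '0'
import Mathlib
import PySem

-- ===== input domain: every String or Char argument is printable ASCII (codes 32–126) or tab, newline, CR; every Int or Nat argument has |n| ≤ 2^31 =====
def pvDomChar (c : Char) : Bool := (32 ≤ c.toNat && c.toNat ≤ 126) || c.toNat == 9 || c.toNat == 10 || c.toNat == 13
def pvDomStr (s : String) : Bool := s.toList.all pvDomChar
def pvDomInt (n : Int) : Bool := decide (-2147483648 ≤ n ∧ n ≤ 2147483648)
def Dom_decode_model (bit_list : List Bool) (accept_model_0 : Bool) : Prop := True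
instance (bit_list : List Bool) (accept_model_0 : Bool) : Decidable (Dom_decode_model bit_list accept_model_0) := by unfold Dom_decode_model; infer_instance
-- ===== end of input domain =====

-- B decodes by reconstruction: it rebuilds the expected codeword (the 4-bit block
-- [b0, b1, b2, checksum] repeated and truncated) from the first three bits and
-- compares it with the input, instead of A's per-index parity/periodicity checks
-- with a valid flag; objective: alternative.

-- ===== PORT A =====
-- the 'for i in range(4, len(bit_list)): if bit_list[i] != bit_list[i-4]: valid=False; break' loop
def decode_model_chk (bs : List Bool) : List Int → Bool
  | [] => true
  | i :: rest =>
    if PySem.List.pyGetD bs i false ≠ PySem.List.pyGetD bs (i - 4) false then false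
    else decode_model_chk bs rest

def decode_model (bit_list : List Bool) (accept_model_0 : Bool) : Option String :=
  let valid :=
    if bit_list.length = 3 then true
    else if 4 ≤ bit_list.length then
      if PySem.List.pyGetD bit_list 3 false =
          xor (PySem.List.pyGetD bit_list 0 false)
            (xor (PySem.List.pyGetD bit_list 1 false) (! PySem.List.pyGetD bit_list 2 false)) then
        decode_model_chk bit_list (PySem.List.pyRange 4 bit_list.length 1)
      else false
    else false
  if valid then
    some (String.mk [Char.ofNat (65 +
      ((cond (PySem.List.pyGetD bit_list 0 false) 1 0) |||
       ((cond (PySem.List.pyGetD bit_list 1 false) 1 0) <<< 1) |||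
       ((cond (PySem.List.pyGetD bit_list 2 false) 1 0) <<< 2)))])
  else if accept_model_0 then
    match PySem.List.max? bit_list (fun x => x) with   -- max(bit_list); none = ValueError on []
    | some m => if m = false then some "0" else none
    | none => none                                     -- A raises here; excluded by Pre_
  else none

-- ===== PORT B =====
-- Python 'block * k' (list repetition)
def pyListMul (l : List Bool) : Nat → List Bool
  | 0 => []
  | k + 1 => l ++ pyListMul l k

def decode_model_alt (bit_list : List Bool) (accept_model_0 : Bool) : Option String :=
  let n := bit_list.length
  if 3 ≤ n then
    let b0 := PySem.List.pyGetD bit_list 0 false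
    let b1 := PySem.List.pyGetD bit_list 1 false
    let b2 := PySem.List.pyGetD bit_list 2 false
    let block := [b0, b1, b2, xor b0 (xor b1 (! b2))]
    let expected := (pyListMul block ((n + 3) / 4)).take n
    if bit_list = expected then
      some (String.mk [Char.ofNat (65 +
        (cond b0 1 0) + 2 * (cond b1 1 0) + 4 * (cond b2 1 0))])
    else if accept_model_0 && ! bit_list.any id then some "0" else none   -- Python fall-through tail
  else if accept_model_0 && ! bit_list.any id then some "0" else none     -- same fall-through tail

-- ===== PRECONDITION & SPEC =====
-- Pre_ excludes only the empty bit list with accept_model_0=True, where A raises ValueError from max([]).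
def Pre_decode_model (bit_list : List Bool) (accept_model_0 : Bool) : Prop :=
  ¬ (bit_list = [] ∧ accept_model_0 = true)
instance (bit_list : List Bool) (accept_model_0 : Bool) : Decidable (Pre_decode_model bit_list accept_model_0) := by unfold Pre_decode_model; infer_instance

def pvWitness_decode_model : List Bool × Bool := ([true, false, true], true)

def Spec_decode_model (bit_list : List Bool) (accept_model_0 : Bool) (out : Option String) : Prop := out = decode_model_alt bit_list accept_model_0
instance (bit_list : List Bool) (accept_model_0 : Bool) (out : Option String) : Decidable (Spec_decode_model bit_list accept_model_0 out) := by unfold Spec_decode_model; infer_instance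

-- ===== CLAIM (what is proved, stated in full; the proofs are below) =====
def Claim_equal_decode_model : Prop := ∀ (bit_list : List Bool) (accept_model_0 : Bool), Dom_decode_model bit_list accept_model_0 → Pre_decode_model bit_list accept_model_0 → Spec_decode_model bit_list accept_model_0 (decode_model bit_list accept_model_0)

-- ===== LEMMAS AND PROOFS =====

-- the bitwise-or letter A builds equals B's arithmetic letter (8 boolean cases)
lemma letter_eq (bs : List Bool) :
    String.mk [Char.ofNat (65 +
      ((cond (bs.getD 0 false) 1 0) |||
       ((cond (bs.getD 1 false) 1 0) <<< 1) |||
       ((cond (bs.getD 2 false) 1 0) <<< 2)))] =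
    String.mk [Char.ofNat (65 +
      (cond (bs.getD 0 false) 1 0) +
      2 * (cond (bs.getD 1 false) 1 0) +
      4 * (cond (bs.getD 2 false) 1 0))] := by
  cases h0 : bs.getD 0 false <;>
    cases h1 : bs.getD 1 false <;>
      cases h2 : bs.getD 2 false <;> rfl

-- A's check loop over range(k, len(bs)) succeeds iff every position k ≤ i < len repeats i-4
lemma chk_iff (bs : List Bool) (k : Nat) (h4 : 4 ≤ k) (hk : k ≤ bs.length) :
    decode_model_chk bs (PySem.List.pyRange k bs.length 1) = true ↔
      ∀ i : Nat, k ≤ i → i < bs.length → bs.getD i false = bs.getD (i - 4) false := by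
  induction hn : bs.length - k generalizing k with
  | zero =>
    rw [PySem.List.pyRange_one_eq_nil (by omega)]
    constructor
    · intro _ i hi hil; omega
    · intro _; rfl
  | succ n ih =>
    rw [PySem.List.pyRange_one_cons (by exact_mod_cast (by omega : (k : Int) < (bs.length : Int)))]
    have hcast : ((k : Int) - 4) = ((k - 4 : Nat) : Int) := by omega
    simp only [decode_model_chk]
    rw [hcast, PySem.List.pyGetD_natCast, PySem.List.pyGetD_natCast]
    by_cases he : bs.getD k false = bs.getD (k - 4) false
    · rw [if_neg (fun h => h he)]
      have h1 : ((k : Int) + 1) = ((k + 1 : Nat) : Int) := by omega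
      rw [h1, ih (k + 1) (by omega) (by omega) (by omega)]
      constructor
      · intro hall i hi hil
        rcases Nat.eq_or_lt_of_le hi with rfl | hlt
        · exact he
        · exact hall i hlt hil
      · intro hall i hi hil; exact hall i (by omega) hil
    · rw [if_pos he]
      constructor
      · intro hf; cases hf
      · intro hall; exact absurd (hall k le_rfl (by omega)) he

lemma pyListMul_length (l : List Bool) (k : Nat) : (pyListMul l k).length = k * l.length := by
  induction k with
  | zero => simp [pyListMul]
  | succ k ih => simp [pyListMul, ih, Nat.succ_mul]; ring

lemma pyListMul_getD (l : List Bool) (k i : Nat) (d : Bool) (hi : i < k * l.length) :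
    (pyListMul l k).getD i d = l.getD (i % l.length) d := by
  induction k generalizing i with
  | zero => simp at hi
  | succ k ih =>
    rw [Nat.succ_mul] at hi
    simp only [pyListMul]
    by_cases h : i < l.length
    · rw [List.getD_append _ _ _ _ h, Nat.mod_eq_of_lt h]
    · rw [List.getD_append_right _ _ _ _ (by omega), ih (i - l.length) (by omega)]
      congr 1
      conv_rhs => rw [show i = (i - l.length) + l.length from by omega]
      rw [Nat.add_mod_right]

lemma getD_take (l : List Bool) (n i : Nat) (d : Bool) (hi : i < n) :
    (l.take n).getD i d = l.getD i d := by
  simp [List.getD, hi]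

-- list equality with the generated codeword ↔ pointwise agreement with the block, modulo 4
lemma eq_repeat_iff (bs block : List Bool) (k : Nat) (hb : block.length = 4)
    (hk : bs.length ≤ k * 4) :
    bs = (pyListMul block k).take bs.length ↔
      ∀ i : Nat, i < bs.length → bs.getD i false = block.getD (i % 4) false := by
  constructor
  · intro heq i hi
    rw [show bs.getD i false = ((pyListMul block k).take bs.length).getD i false from by
        rw [← heq],
      getD_take _ _ _ _ hi, pyListMul_getD block k i false (by rw [hb]; omega), hb]
  · intro hall
    have hlen : bs.length = ((pyListMul block k).take bs.length).length := by
      rw [List.length_take, pyListMul_length, hb]; omega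
    apply List.ext_getElem hlen
    intro i h1 h2
    rw [← List.getD_eq_getElem bs false h1, ← List.getD_eq_getElem _ false h2,
      getD_take _ _ _ _ h1, pyListMul_getD block k i false (by rw [hb]; omega), hb]
    exact hall i h1

-- running max over Bool is "any bit set"
lemma foldl_max_bool (t : List Bool) (x : Bool) : t.foldl max x = (x || t.any id) := by
  induction t generalizing x with
  | nil => simp
  | cons y t ih =>
    rw [List.foldl_cons, ih, Bool.max_eq_or, List.any_cons]
    simp [Bool.or_assoc]

-- the common invalid tail: A's max-based model-0 branch equals B's any-based one (bs nonempty when m0)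
lemma tail_eq (bs : List Bool) (m0 : Bool) (hpre : Pre_decode_model bs m0) :
    (if m0 = true then
        match PySem.List.max? bs (fun x => x) with
        | some m => if m = false then some "0" else none
        | none => none
      else none) =
    (if (m0 && ! bs.any id) = true then some "0" else none) := by
  cases m0 with
  | false => simp
  | true =>
    cases bs with
    | nil => exact absurd ⟨rfl, rfl⟩ hpre
    | cons x t =>
      rw [if_pos rfl, PySem.List.max?_id_cons]
      simp only [foldl_max_bool, List.any_cons, Bool.true_and, id]
      cases h : (x || t.any id) <;> simp

-- A's validity condition for len ≥ 4 ↔ B's codeword equality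
lemma valid_iff (bs : List Bool) (h4 : 4 ≤ bs.length) :
    (bs.getD 3 false =
        xor (bs.getD 0 false) (xor (bs.getD 1 false) (! bs.getD 2 false)) ∧
      ∀ i : Nat, 4 ≤ i → i < bs.length → bs.getD i false = bs.getD (i - 4) false) ↔
    bs = (pyListMul [bs.getD 0 false, bs.getD 1 false, bs.getD 2 false,
            xor (bs.getD 0 false) (xor (bs.getD 1 false) (! bs.getD 2 false))]
          ((bs.length + 3) / 4)).take bs.length := by
  set block := [bs.getD 0 false, bs.getD 1 false, bs.getD 2 false,
      xor (bs.getD 0 false) (xor (bs.getD 1 false) (! bs.getD 2 false))] with hblock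
  have hb : block.length = 4 := rfl
  have hk : bs.length ≤ ((bs.length + 3) / 4) * 4 := by omega
  rw [eq_repeat_iff bs block _ hb hk]
  constructor
  · rintro ⟨hchk, hper⟩ i hi
    induction i using Nat.strong_induction_on with
    | _ i ih =>
      match i with
      | 0 => rfl
      | 1 => rfl
      | 2 => rfl
      | 3 => exact hchk
      | (j + 4) =>
        rw [hper (j + 4) (by omega) hi]
        have : j + 4 - 4 = j := by omega
        rw [this, ih j (by omega) (by omega)]
        congr 1
        omega
  · intro hall
    constructor
    · exact hall 3 (by omega)
    · intro i hi hil
      rw [hall i hil, hall (i - 4) (by omega)]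
      congr 1
      conv_lhs => rw [show i = (i - 4) + 4 from by omega]
      rw [Nat.add_mod_right]

lemma main_lemma (bs : List Bool) (m0 : Bool) (hpre : Pre_decode_model bs m0) :
    decode_model bs m0 = decode_model_alt bs m0 := by
  unfold decode_model decode_model_alt
  simp only [PySem.List.pyGetD_ofNat']
  by_cases h3 : bs.length = 3
  · obtain ⟨a, b, c, rfl⟩ : ∃ a b c, bs = [a, b, c] := by
      match bs, h3 with | [a, b, c], _ => exact ⟨a, b, c, rfl⟩
    cases a <;> cases b <;> cases c <;> cases m0 <;> decide
  · rw [if_neg h3]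
    by_cases h4 : 4 ≤ bs.length
    · rw [if_pos h4, if_pos (by omega : 3 ≤ bs.length)]
      by_cases hc : bs.getD 3 false =
          xor (bs.getD 0 false) (xor (bs.getD 1 false) (! bs.getD 2 false))
      · rw [if_pos hc]
        by_cases hloop : decode_model_chk bs (PySem.List.pyRange 4 bs.length 1) = true
        · have heq := (valid_iff bs h4).mp ⟨hc, (chk_iff bs 4 le_rfl h4).mp hloop⟩
          rw [hloop, if_pos rfl, if_pos heq]
          exact congrArg some (letter_eq bs)
        · have hne : ¬ bs = (pyListMul [bs.getD 0 false, bs.getD 1 false, bs.getD 2 false,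
              xor (bs.getD 0 false) (xor (bs.getD 1 false) (! bs.getD 2 false))]
              ((bs.length + 3) / 4)).take bs.length := fun h =>
            hloop ((chk_iff bs 4 le_rfl h4).mpr ((valid_iff bs h4).mpr h).2)
          rw [Bool.not_eq_true] at hloop
          rw [hloop, if_neg (Bool.false_ne_true), if_neg hne]
          exact tail_eq bs m0 hpre
      · have hne : ¬ bs = (pyListMul [bs.getD 0 false, bs.getD 1 false, bs.getD 2 false,
            xor (bs.getD 0 false) (xor (bs.getD 1 false) (! bs.getD 2 false))]
            ((bs.length + 3) / 4)).take bs.length := fun h =>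
          hc ((valid_iff bs h4).mpr h).1
        rw [if_neg hc, if_neg (Bool.false_ne_true), if_neg hne]
        exact tail_eq bs m0 hpre
    · rw [if_neg h4, if_neg (by omega : ¬ 3 ≤ bs.length), if_neg (Bool.false_ne_true)]
      exact tail_eq bs m0 hpre

-- ===== VERDICT (by name: the statement is the Claim_ definition above) =====
theorem decode_model_spec : Claim_equal_decode_model := by
  intro bs m0 _ hpre
  unfold Spec_decode_model
  exact main_lemma bs m0 hpre
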